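-- pv_equiv track=rewrite | github.com/mugattarova/AdventofCode2024 | d2/d2-2.py | istoleratable
-- ===== SOURCE A (Python) =====
-- def issafe(line):
--   difs = [line[i+1] - line[i] for i in range(len(line)-1)]
--   if not all(0 < abs(d) < 4 for d in difs):
--     return False
--
--   inc = all(d>0 for d in difs)
--   dec = all(d<0 for d in difs)
--
--   if inc or dec:
--     return True
--   return False
--
-- def istoleratable(line):
--   for i in range(len(line)):
--     elem = line[i]
--     del line[i]
--     if issafe(line):
--       return True
--     line.insert(i, elem)
--
--   return False
-- ===== SOURCE B (Python) =====
-- def istoleratable(line):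
--   # O(n): per direction, only the two elements of the FIRST bad adjacent pair
--   # can be removed; test just those candidates with a full safety check.
--   def _safe(xs):
--     d = [b - a for a, b in zip(xs, xs[1:])]
--     return all(1 <= x <= 3 for x in d) or all(-3 <= x <= -1 for x in d)
--
--   def _first_bad(xs, lo, hi):
--     for k, (a, b) in enumerate(zip(xs, xs[1:])):
--       if not (lo <= b - a <= hi):
--         return k
--     return None
--
--   if not line:
--     return False
--   i = _first_bad(line, 1, 3)
--   if i is None:
--     return True  # already increasing-safe: dropping the first element keeps it safe
--   j = _first_bad(line, -3, -1)
--   if j is None: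
--     return True
--   return any(_safe(line[:k] + line[k + 1:]) for k in (i, i + 1, j, j + 1))
-- ===== Notes on version B (the rewrite author's own statement) =====
-- stated objective: faster
-- what changed: A re-tests the whole report after deleting each of the n indices; B finds the first out-of-range adjacent difference for each direction and tests only those at most four candidate removals, so one linear scan replaces the n full re-checks (return value only: A also mutates its argument when it returns True).
import Mathlib
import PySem

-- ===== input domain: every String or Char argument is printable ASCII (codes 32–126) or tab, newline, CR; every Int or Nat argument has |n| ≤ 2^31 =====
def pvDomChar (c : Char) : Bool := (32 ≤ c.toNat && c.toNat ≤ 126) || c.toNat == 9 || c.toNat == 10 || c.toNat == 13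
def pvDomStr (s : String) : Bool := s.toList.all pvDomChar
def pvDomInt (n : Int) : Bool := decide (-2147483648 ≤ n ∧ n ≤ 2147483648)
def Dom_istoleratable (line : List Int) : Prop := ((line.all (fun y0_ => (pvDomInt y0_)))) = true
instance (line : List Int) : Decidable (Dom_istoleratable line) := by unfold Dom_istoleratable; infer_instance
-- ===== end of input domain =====

-- B replaces A's try-every-removal O(n^2) scan by an O(n) candidate search (only the
-- first bad adjacent pair of each direction can be removed); return values agree — note
-- Python A mutates `line` in place (the removed element stays deleted when it returns True);
-- the equivalence proved here is about the RETURN value only.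

-- ===== PORT A =====
-- difs = [line[i+1] - line[i] for i in range(len(line)-1)]  (indices always in range)
def issafe (line : List Int) : Bool :=
  let difs := (PySem.List.pyRange 0 ((line.length : Int) - 1) 1).map
    (fun i => PySem.List.pyGetD line (i + 1) 0 - PySem.List.pyGetD line i 0)
  if !(difs.all (fun d => decide (0 < |d| ∧ |d| < 4))) then false
  else
    let inc := difs.all (fun d => decide (0 < d))
    let dec := difs.all (fun d => decide (d < 0))
    if inc || dec then true else false

-- the loop del line[i] / test / insert back: each iteration tests line with index i removed
-- (i in range, so `del` never raises); `any` mirrors the early `return True`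
def istoleratable (line : List Int) : Bool :=
  (PySem.List.pyRange 0 (line.length : Int) 1).any
    (fun i => issafe (line.eraseIdx i.toNat))

-- ===== PORT B =====
def pvSafeB (xs : List Int) : Bool :=
  let d := (xs.zip xs.tail).map (fun p => p.2 - p.1)
  d.all (fun x => decide (1 ≤ x ∧ x ≤ 3)) || d.all (fun x => decide (-3 ≤ x ∧ x ≤ -1))

-- _first_bad: index of the first adjacent pair whose difference leaves [lo, hi]
def pvFirstBad (lo hi : Int) : List Int → Option Nat
  | a :: b :: rest =>
      if lo ≤ b - a ∧ b - a ≤ hi then (pvFirstBad lo hi (b :: rest)).map (· + 1)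
      else some 0
  | _ => none

def istoleratable_alt (line : List Int) : Bool :=
  if line.isEmpty then false
  else
    match pvFirstBad 1 3 line with
    | none => true
    | some i =>
      match pvFirstBad (-3) (-1) line with
      | none => true
      | some j => [i, i + 1, j, j + 1].any (fun k => pvSafeB (line.eraseIdx k))

-- ===== PRECONDITION & SPEC =====
def Spec_istoleratable (line : List Int) (out : Bool) : Prop := out = istoleratable_alt line
instance (line : List Int) (out : Bool) : Decidable (Spec_istoleratable line out) := by unfold Spec_istoleratable; infer_instance

-- ===== CLAIM (what is proved, stated in full; the proofs are below) =====
def Claim_equal_istoleratable : Prop := ∀ (line : List Int), Dom_istoleratable line → Spec_istoleratable line (istoleratable line)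

-- ===== LEMMAS AND PROOFS =====

-- "all adjacent pairs have a difference in [lo, hi]"
def pvAllP (lo hi : Int) (xs : List Int) : Bool :=
  (xs.zip xs.tail).all (fun p => decide (lo ≤ p.2 - p.1 ∧ p.2 - p.1 ≤ hi))

theorem pvSafeB_eq (xs : List Int) :
    pvSafeB xs = (pvAllP 1 3 xs || pvAllP (-3) (-1) xs) := by
  unfold pvSafeB pvAllP
  simp only [List.all_map]
  rfl

theorem difs_eq (xs : List Int) :
    (PySem.List.pyRange 0 ((xs.length : Int) - 1) 1).map
      (fun i => PySem.List.pyGetD xs (i + 1) 0 - PySem.List.pyGetD xs i 0)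
    = (xs.zip xs.tail).map (fun p => p.2 - p.1) := by
  apply List.ext_getElem
  · simp only [List.length_map, PySem.List.length_pyRange_one, List.length_zip,
      List.length_tail]
    omega
  · intro k h1 h2
    have hk : k + 1 < xs.length := by
      simp only [List.length_map, PySem.List.length_pyRange_one] at h1
      omega
    simp only [List.getElem_map, PySem.List.getElem_pyRange_one, List.getElem_zip,
      List.getElem_tail, zero_add]
    have e1 : PySem.List.pyGetD xs ((k : Int) + 1) 0 = xs[k + 1] := by
      rw [show ((k : Int) + 1) = ((k + 1 : Nat) : Int) by push_cast; ring]
      rw [PySem.List.pyGetD_natCast]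
      exact List.getD_eq_getElem xs 0 hk
    have e2 : PySem.List.pyGetD xs (k : Int) 0 = xs[k] := by
      rw [PySem.List.pyGetD_natCast]
      exact List.getD_eq_getElem xs 0 (by omega)
    rw [e1, e2]

theorem issafe_eq (xs : List Int) : issafe xs = pvSafeB xs := by
  unfold issafe
  rw [difs_eq, pvSafeB_eq]
  unfold pvAllP
  simp only [List.all_map]
  have hift : ∀ (b0 b1 b2 : Bool),
      (if (!b0) then false else if b1 || b2 then true else false)
        = (b0 && b1 || b0 && b2) := by
    decide
  rw [hift]
  congr 1
  · rw [Bool.eq_iff_iff, Bool.and_eq_true, List.all_eq_true, List.all_eq_true,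
      List.all_eq_true]
    constructor
    · rintro ⟨ha, hb⟩ p hp
      have a1 := ha p hp
      have a2 := hb p hp
      simp only [Function.comp_apply, decide_eq_true_eq, abs_lt, abs_pos] at a1 a2 ⊢
      omega
    · intro h
      refine ⟨?_, ?_⟩ <;> intro p hp <;> have := h p hp <;>
        simp only [Function.comp_apply, decide_eq_true_eq, abs_lt, abs_pos] at this ⊢ <;>
        omega
  · rw [Bool.eq_iff_iff, Bool.and_eq_true, List.all_eq_true, List.all_eq_true,
      List.all_eq_true]
    constructor
    · rintro ⟨ha, hb⟩ p hp
      have a1 := ha p hp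
      have a2 := hb p hp
      simp only [Function.comp_apply, decide_eq_true_eq, abs_lt, abs_pos] at a1 a2 ⊢
      omega
    · intro h
      refine ⟨?_, ?_⟩ <;> intro p hp <;> have := h p hp <;>
        simp only [Function.comp_apply, decide_eq_true_eq, abs_lt, abs_pos] at this ⊢ <;>
        omega

theorem pvFirstBad_none (lo hi : Int) (xs : List Int) :
    pvFirstBad lo hi xs = none ↔ pvAllP lo hi xs = true := by
  induction xs with
  | nil => simp [pvFirstBad, pvAllP]
  | cons a t ih =>
    cases t with
    | nil => simp [pvFirstBad, pvAllP]
    | cons b r =>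
      by_cases h : lo ≤ b - a ∧ b - a ≤ hi
      · simp only [pvFirstBad, if_pos h]
        rw [show pvAllP lo hi (a :: b :: r)
              = (decide (lo ≤ b - a ∧ b - a ≤ hi) && pvAllP lo hi (b :: r)) by
            simp [pvAllP]]
        simp [h, ih]
      · simp only [pvFirstBad, if_neg h]
        constructor
        · intro hc
          exact absurd hc (by simp)
        · intro hc
          exfalso
          simp only [pvAllP, List.tail_cons, List.zip_cons_cons, List.all_cons,
            Bool.and_eq_true, decide_eq_true_eq] at hc
          exact h hc.1

theorem pvAllP_tail (lo hi : Int) (xs : List Int) (h : pvAllP lo hi xs = true) :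
    pvAllP lo hi xs.tail = true := by
  cases xs with
  | nil => simpa using h
  | cons a t =>
    cases t with
    | nil => simp [pvAllP]
    | cons b r =>
      simp only [pvAllP, List.tail_cons, List.zip_cons_cons, List.all_cons,
        Bool.and_eq_true] at h ⊢
      exact h.2

theorem pvAllP_pair (lo hi : Int) (l : List Int) (h : pvAllP lo hi l = true)
    (p : Nat) (hp : p + 1 < l.length) :
    lo ≤ l[p + 1] - l[p] ∧ l[p + 1] - l[p] ≤ hi := by
  induction l generalizing p with
  | nil => simp at hp
  | cons a t ih =>
    cases t with
    | nil => simp at hp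
    | cons b r =>
      have hsplit : (lo ≤ b - a ∧ b - a ≤ hi) ∧ pvAllP lo hi (b :: r) = true := by
        simp only [pvAllP, List.tail_cons, List.zip_cons_cons, List.all_cons,
          Bool.and_eq_true, decide_eq_true_eq] at h ⊢
        exact h
      cases p with
      | zero => simpa using hsplit.1
      | succ q =>
        have hq : q + 1 < (b :: r).length := by simp at hp ⊢; omega
        have := ih hsplit.2 q hq
        simpa using this

theorem pvFirstBad_some (lo hi : Int) (xs : List Int) (k : Nat)
    (h : pvFirstBad lo hi xs = some k) :
    ∃ hk : k + 1 < xs.length,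
      ¬(lo ≤ xs[k + 1] - xs[k] ∧ xs[k + 1] - xs[k] ≤ hi) := by
  induction xs generalizing k with
  | nil => simp [pvFirstBad] at h
  | cons a t ih =>
    cases t with
    | nil => simp [pvFirstBad] at h
    | cons b r =>
      by_cases hc : lo ≤ b - a ∧ b - a ≤ hi
      · simp only [pvFirstBad, if_pos hc, Option.map_eq_some_iff] at h
        obtain ⟨k', hk', rfl⟩ := h
        obtain ⟨hlen, hbad⟩ := ih k' hk'
        refine ⟨by simp at hlen ⊢; omega, ?_⟩
        simpa using hbad
      · simp only [pvFirstBad, if_neg hc, Option.some_inj] at h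
        subst h
        refine ⟨by simp, ?_⟩
        simpa using hc

-- a bad pair (k, k+1) survives the removal of any index other than k and k+1
theorem pvAllP_eraseIdx (lo hi : Int) (xs : List Int) (k m : Nat)
    (hk : k + 1 < xs.length) (hm1 : m ≠ k) (hm2 : m ≠ k + 1)
    (hall : pvAllP lo hi (xs.eraseIdx m) = true) :
    lo ≤ xs[k + 1] - xs[k] ∧ xs[k + 1] - xs[k] ≤ hi := by
  by_cases hml : xs.length ≤ m
  · rw [List.eraseIdx_of_length_le hml] at hall
    exact pvAllP_pair lo hi xs hall k hk
  · have hml' : m < xs.length := by omega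
    have hlen : (xs.eraseIdx m).length = xs.length - 1 := by
      rw [List.length_eraseIdx]
      simp [hml']
    rcases Nat.lt_or_ge m k with hmk | hmk
    · -- m < k: the pair sits at positions (k-1, k) after the removal
      have hp : (k - 1) + 1 < (xs.eraseIdx m).length := by
        rw [hlen]; omega
      have hpr := pvAllP_pair lo hi _ hall (k - 1) hp
      have e1 : (xs.eraseIdx m)[(k - 1) + 1]'hp = xs[k + 1] := by
        rw [List.getElem_eraseIdx_of_ge _ (by omega)]
        congr 1
        omega
      have e2 : (xs.eraseIdx m)[k - 1]'(by rw [hlen]; omega) = xs[k] := by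
        rw [List.getElem_eraseIdx_of_ge _ (by omega)]
        congr 1
        omega
      rw [e1, e2] at hpr
      exact hpr
    · -- m > k + 1: the pair keeps its positions
      have hmk' : k + 1 < m := by omega
      have hp : k + 1 < (xs.eraseIdx m).length := by
        rw [hlen]; omega
      have hpr := pvAllP_pair lo hi _ hall k hp
      have e1 : (xs.eraseIdx m)[k + 1]'hp = xs[k + 1] :=
        List.getElem_eraseIdx_of_lt _ (by omega)
      have e2 : (xs.eraseIdx m)[k]'(by rw [hlen]; omega) = xs[k] :=
        List.getElem_eraseIdx_of_lt _ (by omega)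
      rw [e1, e2] at hpr
      exact hpr

theorem istoleratable_any (line : List Int) :
    istoleratable line = true ↔
      ∃ m, m < line.length ∧ pvSafeB (line.eraseIdx m) = true := by
  unfold istoleratable
  rw [List.any_eq_true]
  constructor
  · rintro ⟨i, hi, hf⟩
    rw [PySem.List.mem_pyRange_one] at hi
    refine ⟨i.toNat, by omega, ?_⟩
    rw [← issafe_eq]
    exact hf
  · rintro ⟨m, hm, hf⟩
    refine ⟨(m : Int), ?_, ?_⟩
    · rw [PySem.List.mem_pyRange_one]
      constructor <;> omega
    · rw [issafe_eq]
      simpa using hf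

-- ===== VERDICT (by name: the statement is the Claim_ definition above) =====
theorem istoleratable_spec : Claim_equal_istoleratable := by
  intro line _
  unfold Spec_istoleratable istoleratable_alt
  by_cases hemp : line.isEmpty
  · rw [if_pos hemp]
    rw [List.isEmpty_iff] at hemp
    subst hemp
    decide
  · rw [if_neg hemp]
    have hne : line ≠ [] := by simpa using hemp
    have hlen0 : 0 < line.length := List.length_pos_iff.mpr hne
    cases hI : pvFirstBad 1 3 line with
    | none =>
      have hall := (pvFirstBad_none 1 3 line).mp hI
      have hs : pvSafeB (line.eraseIdx 0) = true := by
        rw [pvSafeB_eq, Bool.or_eq_true]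
        left
        rw [List.eraseIdx_zero]
        exact pvAllP_tail 1 3 line hall
      show istoleratable line = true
      exact (istoleratable_any line).mpr ⟨0, hlen0, hs⟩
    | some i =>
      cases hJ : pvFirstBad (-3) (-1) line with
      | none =>
        have hall := (pvFirstBad_none (-3) (-1) line).mp hJ
        have hs : pvSafeB (line.eraseIdx 0) = true := by
          rw [pvSafeB_eq, Bool.or_eq_true]
          right
          rw [List.eraseIdx_zero]
          exact pvAllP_tail (-3) (-1) line hall
        show istoleratable line = true
        exact (istoleratable_any line).mpr ⟨0, hlen0, hs⟩
      | some j =>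
        obtain ⟨hilen, hibad⟩ := pvFirstBad_some 1 3 line i hI
        obtain ⟨hjlen, hjbad⟩ := pvFirstBad_some (-3) (-1) line j hJ
        show istoleratable line = ([i, i + 1, j, j + 1].any fun k => pvSafeB (line.eraseIdx k))
        rw [Bool.eq_iff_iff, istoleratable_any, List.any_eq_true]
        constructor
        · rintro ⟨m, hm, hsafe⟩
          have hsor := hsafe
          rw [pvSafeB_eq, Bool.or_eq_true] at hsor
          have hmem : m = i ∨ m = i + 1 ∨ m = j ∨ m = j + 1 := by
            rcases hsor with hs | hs
            · by_cases h1 : m = i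
              · exact Or.inl h1
              by_cases h2 : m = i + 1
              · exact Or.inr (Or.inl h2)
              exact absurd (pvAllP_eraseIdx 1 3 line i m hilen h1 h2 hs) hibad
            · by_cases h1 : m = j
              · exact Or.inr (Or.inr (Or.inl h1))
              by_cases h2 : m = j + 1
              · exact Or.inr (Or.inr (Or.inr h2))
              exact absurd (pvAllP_eraseIdx (-3) (-1) line j m hjlen h1 h2 hs) hjbad
          exact ⟨m, by rcases hmem with rfl | rfl | rfl | rfl <;> simp, hsafe⟩
        · rintro ⟨k, hkmem, hsafe⟩
          have hk : k = i ∨ k = i + 1 ∨ k = j ∨ k = j + 1 := by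
            simpa using hkmem
          refine ⟨k, by rcases hk with rfl | rfl | rfl | rfl <;> omega, hsafe⟩
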